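-- pv_equiv track=rewrite | github.com/localparty/integers | solutions-with-prize/paper28-pvnp/code/test_o9_clone_amenability.py | essential_arity
-- ===== SOURCE A (Python) =====
-- def essential_arity(tt, k):
--     """Return the number of coordinates tt genuinely depends on."""
--     tt_size = 2 ** k
--     dep_count = 0
--     for coord in range(k):
--         for j in range(tt_size):
--             j_flipped = j ^ (1 << (k - 1 - coord))
--             if ((tt >> j) & 1) != ((tt >> j_flipped) & 1):
--                 dep_count += 1
--                 break
--     return dep_count
-- ===== SOURCE B (Python) =====
-- def essential_arity(tt, k):
--     """Return the number of coordinates tt genuinely depends on."""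
--     if k <= 0:
--         return 0
--     n = 1 << k  # table size
--     dep_count = 0
--     for b in range(k):
--         # Coordinate b is essential iff the table differs somewhere from its
--         # 2**b-shift at a table position whose index bit b is clear.  The xor
--         # word x holds all those pairwise differences at once; scan its bits.
--         m = 1 << b
--         x = tt ^ (tt >> m)  # nonnegative: the sign bits cancel in the xor
--         j = 0
--         while x:
--             if j >= n:
--                 break  # remaining differences lie beyond the table
--             if (x & 1) and not (j & m):
--                 dep_count += 1
--                 break
--             x >>= 1
--             j += 1
--     return dep_count
-- ===== Notes on version B (the rewrite author's own statement) =====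
-- stated objective: alternative
-- what changed: B replaces A's per-coordinate early-exit scan over all 2^k truth-table entries by computing the xor-difference word tt ^ (tt >> 2**b) once per coordinate and scanning only its set bits for one inside the table with index bit b clear.
import Mathlib
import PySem

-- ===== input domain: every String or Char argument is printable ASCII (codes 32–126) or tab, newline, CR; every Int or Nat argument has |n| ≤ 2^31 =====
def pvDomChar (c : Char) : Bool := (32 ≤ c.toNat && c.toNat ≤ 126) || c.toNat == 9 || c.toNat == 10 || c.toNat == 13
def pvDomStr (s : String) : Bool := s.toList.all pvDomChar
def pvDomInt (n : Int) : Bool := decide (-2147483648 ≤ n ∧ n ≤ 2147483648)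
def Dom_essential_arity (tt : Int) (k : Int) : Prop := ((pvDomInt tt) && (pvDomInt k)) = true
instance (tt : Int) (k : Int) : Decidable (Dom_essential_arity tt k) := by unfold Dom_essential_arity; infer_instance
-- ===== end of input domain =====

-- B replaces A's per-coordinate scan over all 2^k table entries by one xor-difference
-- word per coordinate whose set bits are scanned directly (objective: alternative).

-- ===== PORT A =====
-- A's inner `for j in range(tt_size): if …: dep_count += 1; break`: a lazy first-hit
-- scan (Python's range is lazy and the loop breaks at the first difference).
def pvBreakScan (tt : Int) (k : Int) (coord : Int) (tt_size : Int) (j : Int) : Bool :=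
  if h : j < tt_size then
    let j_flipped : Int := PySem.Int.bxor j ((1 : Int) <<< (k - 1 - coord).toNat)
    if PySem.Int.band (tt >>> j.toNat) 1 != PySem.Int.band (tt >>> j_flipped.toNat) 1
    then true
    else pvBreakScan tt k coord tt_size (j + 1)
  else false
termination_by (tt_size - j).toNat
decreasing_by omega

-- `tt_size = 2 ** k`: exact for k ≥ 0; for k < 0 Python makes the float 2**k, which is
-- never used (the outer range(k) is empty), so the value below is irrelevant there too.
def essential_arity (tt : Int) (k : Int) : Int :=
  let tt_size : Int := (2 : Int) ^ k.toNat
  (PySem.List.pyRange 0 k).foldl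
    (fun dep_count coord =>
      if pvBreakScan tt k coord tt_size 0
      then dep_count + 1 else dep_count)
    0

-- ===== PORT B =====
-- Source B's inner `while x:` scan over the bits of the xor word; the `0 < x` guard
-- (Python's `x != 0`) only makes the recursion total: at every call site x is the
-- xor of an integer with its own right shift and hence nonnegative.
def pvBitScan (n : Int) (m : Int) (x : Int) (j : Int) : Bool :=
  if hx : 0 < x then
    if n ≤ j then false
    else if PySem.Int.band x 1 != 0 && PySem.Int.band j m == 0 then true
    else pvBitScan n m (x >>> (1 : Nat)) (j + 1)
  else false
termination_by x.toNat
decreasing_by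
  cases x with
  | ofNat xn =>
    have hn : 0 < xn := by
      simp only [Int.ofNat_eq_natCast] at hx
      exact_mod_cast hx
    show (Int.ofNat (xn >>> 1)).toNat < (Int.ofNat xn).toNat
    simpa [Nat.shiftRight_one] using Nat.div_lt_self hn (by norm_num)
  | negSucc xn => exact absurd hx (not_lt.mpr (Int.negSucc_lt_zero xn).le)

-- transliteration of Source B: per bit position b, xor the table with its 2**b-shift
-- and scan the set bits of that difference word for one inside the table with
-- index bit b clear.
def essential_arity_alt (tt : Int) (k : Int) : Int :=
  if k ≤ 0 then 0
  else
    let n := (1 : Int) <<< k.toNat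
    (PySem.List.pyRange 0 k).foldl
      (fun dep_count b =>
        let m := (1 : Int) <<< b.toNat
        if pvBitScan n m (PySem.Int.bxor tt (tt >>> m.toNat)) 0
        then dep_count + 1 else dep_count)
      0

-- ===== PRECONDITION & SPEC =====
def Spec_essential_arity (tt : Int) (k : Int) (out : Int) : Prop := out = essential_arity_alt tt k
instance (tt : Int) (k : Int) (out : Int) : Decidable (Spec_essential_arity tt k out) := by unfold Spec_essential_arity; infer_instance

-- ===== CLAIM (what is proved, stated in full; the proofs are below) =====
def Claim_equal_essential_arity : Prop := ∀ (tt : Int) (k : Int), Dom_essential_arity tt k → Spec_essential_arity tt k (essential_arity tt k)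

-- ===== LEMMAS AND PROOFS =====

-- `pvAbs tt` carries tt's two's-complement bit pattern: bit i of tt is
-- (pvAbs tt).testBit i, complemented globally when tt < 0.
def pvAbs (tt : Int) : Nat :=
  match tt with
  | Int.ofNat n => n
  | Int.negSucc n => n

-- the essential-dependence predicate both ports are reduced to
def pvDep (u : Nat) (K b : Nat) : Prop :=
  ∃ i, i < 2 ^ K ∧ i % 2 ^ (b + 1) < 2 ^ b ∧ u.testBit i ≠ u.testBit (i + 2 ^ b)

def pvDepDec (u K b : Nat) : Decidable (pvDep u K b) := by
  unfold pvDep; infer_instance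

def pvDepB (u K b : Nat) : Bool :=
  @decide (pvDep u K b) (pvDepDec u K b)

theorem pvDepB_eq (u K b : Nat) : pvDepB u K b = true ↔ pvDep u K b := by
  unfold pvDepB
  exact @decide_eq_true_iff (pvDep u K b) (pvDepDec u K b)

theorem pvDepB_false (u K b : Nat) (h : ¬ pvDep u K b) : pvDepB u K b = false := by
  cases hB : pvDepB u K b
  · rfl
  · exact absurd ((pvDepB_eq u K b).mp hB) h

theorem pvCastDiv (n i : Nat) : (n : Int) / 2 ^ i = ((n / 2 ^ i : Nat) : Int) := by
  push_cast; ring_nf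

-- A's bit read (tt >> i) & 1, through pvAbs
theorem pvBandOne (tt : Int) (i : Nat) :
    PySem.Int.band (tt >>> i) 1 =
      (if ((pvAbs tt).testBit i) = (decide (tt < 0) = false) then 1 else 0) := by
  rw [PySem.Int.band_one, PySem.Int.mod_eq_emod_of_pos (by norm_num)]
  cases tt with
  | ofNat n =>
    show (Int.ofNat (n >>> i)) % 2 = _
    rw [Nat.shiftRight_eq_div_pow]
    have ht : n.testBit i = decide (n / 2 ^ i % 2 = 1) := Nat.testBit_eq_decide_div_mod_eq
    rcases Nat.mod_two_eq_zero_or_one (n / 2 ^ i) with h2 | h2 <;>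
      simp [pvAbs, Int.ofNat_eq_natCast, ht, h2] <;> rw [pvCastDiv] <;> omega
  | negSucc n =>
    show (Int.negSucc (n >>> i)) % 2 = _
    rw [Nat.shiftRight_eq_div_pow]
    have ht : n.testBit i = decide (n / 2 ^ i % 2 = 1) := Nat.testBit_eq_decide_div_mod_eq
    have hneg : (Int.negSucc n < 0) = True := by simp
    have hm : (Int.negSucc (n / 2 ^ i)) % 2 = 1 - ((n / 2 ^ i : Nat) : Int) % 2 := by
      rw [Int.negSucc_eq]; omega
    rcases Nat.mod_two_eq_zero_or_one (n / 2 ^ i) with h2 | h2 <;>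
      simp [pvAbs, hm, ht, h2, hneg] <;> rw [pvCastDiv] <;> omega

-- B's xor word tt ^ (tt >> m), through pvAbs (the complement cancels in the xor)
theorem pvXorWord (tt : Int) (m : Nat) :
    PySem.Int.bxor tt (tt >>> m) = ((pvAbs tt ^^^ (pvAbs tt >>> m) : Nat) : Int) := by
  cases tt with
  | ofNat n =>
    show PySem.Int.bxor (Int.ofNat n) (Int.ofNat (n >>> m)) = _
    have h1 : (0:Int) ≤ Int.ofNat n := Int.natCast_nonneg n
    have h2 : (0:Int) ≤ Int.ofNat (n >>> m) := Int.natCast_nonneg _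
    unfold PySem.Int.bxor
    rw [if_pos h1, if_pos h2]
    have e1 : (Int.ofNat n).toNat = n := rfl
    have e2 : (Int.ofNat (n >>> m)).toNat = n >>> m := rfl
    rw [e1, e2]
    rfl
  | negSucc n =>
    show PySem.Int.bxor (Int.negSucc n) (Int.negSucc (n >>> m)) = _
    have h1 : ¬ (0:Int) ≤ Int.negSucc n := not_le.mpr (Int.negSucc_lt_zero n)
    have h2 : ¬ (0:Int) ≤ Int.negSucc (n >>> m) := not_le.mpr (Int.negSucc_lt_zero _)
    unfold PySem.Int.bxor
    rw [if_neg h1, if_neg h2]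
    have e1 : (-Int.negSucc n - 1).toNat = n := by rw [Int.negSucc_eq]; simp
    have e2 : (-Int.negSucc (n >>> m) - 1).toNat = n >>> m := by
      generalize n >>> m = q
      rw [Int.negSucc_eq]; omega
    rw [e1, e2]
    rfl

-- xor with 2^b adds 2^b when bit b is clear
theorem pvXorTwoPow_add (b : Nat) : ∀ (j : Nat), j.testBit b = false → j ^^^ 2 ^ b = j + 2 ^ b := by
  induction b with
  | zero =>
    intro j h
    rw [Nat.testBit_zero] at h
    simp at h
    have : Even j := Nat.even_iff.mpr (by omega)
    simpa using Nat.xor_one_of_even this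
  | succ b ih =>
    intro j h
    rw [Nat.testBit_succ] at h
    have hbit : j = Nat.bit (decide (j % 2 = 1)) (j / 2) := by
      rcases Nat.mod_two_eq_zero_or_one j with h2 | h2 <;> simp [Nat.bit, h2] <;> omega
    have hpow : (2 : Nat) ^ (b + 1) = Nat.bit false (2 ^ b) := by simp [Nat.bit]; ring
    conv_lhs => rw [hbit, hpow, Nat.xor_bit, ih _ h]
    rcases Nat.mod_two_eq_zero_or_one j with h2 | h2 <;> simp [Nat.bit, h2] <;> omega

-- bit b of j is clear iff j mod 2^(b+1) < 2^b
theorem pvBitClear_iff (j b : Nat) : j.testBit b = false ↔ j % 2 ^ (b + 1) < 2 ^ b := by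
  have hm : j % 2 ^ (b+1) = j % 2 ^ b + 2 ^ b * (j / 2 ^ b % 2) := by
    rw [pow_succ]
    exact Nat.mod_mul
  have hlt : j % 2 ^ b < 2 ^ b := Nat.mod_lt _ (Nat.two_pow_pos _)
  rw [Nat.testBit_eq_decide_div_mod_eq, hm]
  rcases Nat.mod_two_eq_zero_or_one (j / 2 ^ b) with h2 | h2 <;> (rw [h2]; simp; try omega)

-- A's xor-indexed difference search equals pvDep
theorem pvDep_xor_iff (u K b : Nat) (hb : b < K) :
    (∃ j, j < 2 ^ K ∧ u.testBit j ≠ u.testBit (j ^^^ 2 ^ b)) ↔ pvDep u K b := by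
  have hbK : (2:Nat) ^ b < 2 ^ K := Nat.pow_lt_pow_right (by norm_num) hb
  constructor
  · rintro ⟨j, hj, hne⟩
    by_cases hcl : j.testBit b = false
    · exact ⟨j, hj, (pvBitClear_iff j b).mp hcl, by rwa [← pvXorTwoPow_add b j hcl]⟩
    · have hset : j.testBit b = true := by
        cases h : j.testBit b
        · exact absurd h hcl
        · rfl
      refine ⟨j ^^^ 2 ^ b, Nat.xor_lt_two_pow hj hbK, ?_, ?_⟩
      · apply (pvBitClear_iff _ b).mp
        rw [Nat.testBit_xor, hset, Nat.testBit_two_pow_self]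
        rfl
      · have hcl2 : (j ^^^ 2 ^ b).testBit b = false := by
          rw [Nat.testBit_xor, hset, Nat.testBit_two_pow_self]
          rfl
        rw [← pvXorTwoPow_add b _ hcl2, Nat.xor_xor_cancel_right]
        exact fun h => hne h.symm
  · rintro ⟨i, hi, hmod, hne⟩
    refine ⟨i, hi, ?_⟩
    rwa [pvXorTwoPow_add b i ((pvBitClear_iff i b).mpr hmod)]

-- A's per-element test, reduced to testBit on pvAbs
theorem pvElemA (tt : Int) (b : Nat) (jn : Nat) :
    (PySem.Int.band (tt >>> ((jn : Int)).toNat) 1 !=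
       PySem.Int.band (tt >>> (PySem.Int.bxor (jn : Int) ((1 : Int) <<< b)).toNat) 1)
      = ((pvAbs tt).testBit jn != (pvAbs tt).testBit (jn ^^^ 2 ^ b)) := by
  have hsh : ((1 : Int) <<< b) = ((2 ^ b : Nat) : Int) := by
    show Int.ofNat (1 <<< b) = _
    rw [Nat.one_shiftLeft]
    rfl
  rw [hsh, PySem.Int.bxor_natCast, Int.toNat_natCast, Int.toNat_natCast, pvBandOne, pvBandOne]
  cases s : decide (tt < 0) <;>
    cases h1 : (pvAbs tt).testBit jn <;>
      cases h2 : (pvAbs tt).testBit (jn ^^^ 2 ^ b) <;> simp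

-- pyRange j n is empty once j ≥ n
theorem pvPyRange_nil (j n : Int) (h : ¬ j < n) : PySem.List.pyRange j n = [] := by
  apply List.eq_nil_iff_forall_not_mem.mpr
  intro x hx
  have := PySem.List.mem_pyRange_one.mp hx
  omega

-- the break-loop is the first-hit search over the remaining range
theorem pvBreakScan_eq (tt k coord n : Int) : ∀ (fuel : Nat) (j : Int),
    (n - j).toNat ≤ fuel →
    pvBreakScan tt k coord n j =
      (PySem.List.pyRange j n).any (fun jj =>
        PySem.Int.band (tt >>> jj.toNat) 1 !=
        PySem.Int.band (tt >>> (PySem.Int.bxor jj ((1 : Int) <<< (k - 1 - coord).toNat)).toNat) 1) := by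
  intro fuel
  induction fuel with
  | zero =>
    intro j hj
    have hnj : ¬ j < n := by omega
    rw [pvPyRange_nil j n hnj]
    unfold pvBreakScan
    rw [dif_neg hnj]
    rfl
  | succ fuel ih =>
    intro j hj
    by_cases hlt : j < n
    · rw [PySem.List.pyRange_one_cons hlt, List.any_cons]
      unfold pvBreakScan
      rw [dif_pos hlt]
      by_cases hc : (PySem.Int.band (tt >>> j.toNat) 1 !=
          PySem.Int.band (tt >>> (PySem.Int.bxor j ((1 : Int) <<< (k - 1 - coord).toNat)).toNat) 1) = true
      · simp only [hc, if_pos]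
        simp
      · have hcf : (PySem.Int.band (tt >>> j.toNat) 1 !=
            PySem.Int.band (tt >>> (PySem.Int.bxor j ((1 : Int) <<< (k - 1 - coord).toNat)).toNat) 1) = false :=
          Bool.eq_false_iff.mpr hc
        rw [if_neg (by simp [hcf]), ih (j + 1) (by omega)]
        simp [hcf]
    · rw [pvPyRange_nil j n hlt]
      unfold pvBreakScan
      rw [dif_neg hlt]
      rfl

-- A's inner loop (first-hit search over the whole table) decides pvDep
theorem pvInnerA (tt : Int) (K b : Nat) (hb : b < K) :
    ((PySem.List.pyRange 0 ((2:Int) ^ K)).any (fun j =>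
        PySem.Int.band (tt >>> j.toNat) 1 !=
        PySem.Int.band (tt >>> (PySem.Int.bxor j ((1 : Int) <<< b)).toNat) 1))
      = pvDepB (pvAbs tt) K b := by
  have hiff : ((PySem.List.pyRange 0 ((2:Int) ^ K)).any (fun j =>
        PySem.Int.band (tt >>> j.toNat) 1 !=
        PySem.Int.band (tt >>> (PySem.Int.bxor j ((1 : Int) <<< b)).toNat) 1)) = true
      ↔ pvDep (pvAbs tt) K b := by
    rw [List.any_eq_true, ← pvDep_xor_iff (pvAbs tt) K b hb]
    constructor
    · rintro ⟨j, hmem, hp⟩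
      obtain ⟨h0, hlt⟩ := PySem.List.mem_pyRange_one.mp hmem
      obtain ⟨jn, rfl⟩ : ∃ jn : Nat, j = (jn : Int) := ⟨j.toNat, (Int.toNat_of_nonneg h0).symm⟩
      rw [pvElemA] at hp
      refine ⟨jn, ?_, by simpa using hp⟩
      have : ((2:Int) ^ K) = ((2 ^ K : Nat) : Int) := by push_cast; ring
      rw [this] at hlt
      exact_mod_cast hlt
    · rintro ⟨jn, hjn, hne⟩
      refine ⟨(jn : Int), PySem.List.mem_pyRange_one.mpr ⟨Int.natCast_nonneg _, ?_⟩, ?_⟩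
      · have : ((2:Int) ^ K) = ((2 ^ K : Nat) : Int) := by push_cast; ring
        rw [this]
        exact_mod_cast hjn
      · rw [pvElemA]
        simpa using hne
  by_cases hd : pvDep (pvAbs tt) K b
  · rw [(pvDepB_eq _ _ _).mpr hd]
    exact hiff.mpr hd
  · rw [pvDepB_false _ _ _ hd]
    exact Bool.eq_false_iff.mpr (fun h => hd (hiff.mp h))

-- Python's `1 << b` as it elaborates in B's port
theorem pvOneShl (bn : Nat) : (1 : Int) <<< bn = ((2 ^ bn : Nat) : Int) := by
  show Int.ofNat (1 <<< bn) = _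
  rw [Nat.one_shiftLeft]
  rfl

-- same, with the shift amount elaborated as an Int (B's fold body)
theorem pvOneShlI (bn : Nat) : (1 : Int) <<< ((bn : Nat) : Int) = ((2 ^ bn : Nat) : Int) := by
  have h := Int.shiftLeft_natCast 1 bn
  simpa [Nat.shiftLeft_eq] using h

-- `x & 1` of a cast Nat is nonzero iff its bit 0 is set
theorem pvBandOneBit (xn : Nat) : (PySem.Int.band ((xn : Nat) : Int) 1 != 0) = xn.testBit 0 := by
  have h1 : (1 : Int) = ((1 : Nat) : Int) := rfl
  rw [h1, PySem.Int.band_natCast, Nat.and_one_is_mod]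
  rcases Nat.mod_two_eq_zero_or_one xn with h | h <;>
    simp [Nat.testBit_zero, h]

-- `j & m == 0` for m = 2^b tests that bit b of j is clear
theorem pvBandPowZero (jn b : Nat) :
    (PySem.Int.band ((jn : Nat) : Int) ((2 ^ b : Nat) : Int) == 0) = !jn.testBit b := by
  rw [PySem.Int.band_natCast, Nat.and_two_pow]
  cases h : jn.testBit b
  · simp
  · simp

-- Source B's bit scan finds a set bit of x inside the table with index bit b clear
theorem pvBitScan_iff (K b : Nat) (xn : Nat) : ∀ (jn : Nat),
    (pvBitScan (((2 ^ K : Nat) : Int)) (((2 ^ b : Nat) : Int)) ((xn : Nat) : Int) ((jn : Nat) : Int) = true)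
      ↔ ∃ i, xn.testBit i = true ∧ jn + i < 2 ^ K ∧ (jn + i) % 2 ^ (b + 1) < 2 ^ b := by
  induction xn using Nat.strong_induction_on with
  | _ xn ih =>
    intro jn
    unfold pvBitScan
    by_cases hx : 0 < xn
    · rw [dif_pos (by exact_mod_cast hx)]
      by_cases hj : (2 : Nat) ^ K ≤ jn
      · rw [if_pos (by exact_mod_cast hj)]
        simp only [Bool.false_eq_true, false_iff]
        rintro ⟨i, -, h2, -⟩
        omega
      · rw [if_neg (by exact_mod_cast hj)]
        rw [pvBandOneBit, pvBandPowZero]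
        by_cases h0 : (xn.testBit 0 && !jn.testBit b) = true
        · rw [if_pos h0]
          simp only [Bool.and_eq_true, Bool.not_eq_eq_eq_not, Bool.not_true] at h0
          simp only [true_iff]
          exact ⟨0, h0.1, by omega, by
            have := (pvBitClear_iff jn b).mp (by simpa using h0.2)
            simpa using this⟩
        · rw [if_neg h0]
          have hsh : ((xn : Nat) : Int) >>> (1 : Nat) = (((xn >>> 1 : Nat) : Nat) : Int) := rfl
          have hj1 : ((jn : Nat) : Int) + 1 = (((jn + 1 : Nat) : Nat) : Int) := by push_cast; ring
          have hlt : xn >>> 1 < xn := by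
            rw [Nat.shiftRight_one]
            exact Nat.div_lt_self hx (by norm_num)
          rw [hsh, hj1, ih (xn >>> 1) hlt (jn + 1)]
          simp only [Bool.and_eq_true, Bool.not_eq_eq_eq_not, Bool.not_true, not_and] at h0
          constructor
          · rintro ⟨i, h1, h2, h3⟩
            refine ⟨i + 1, ?_, by omega, by
              have : jn + 1 + i = jn + (i + 1) := by omega
              rw [this] at h3
              exact h3⟩
            rw [Nat.testBit_add_one]
            rw [Nat.shiftRight_one] at h1
            exact h1
          · rintro ⟨i, h1, h2, h3⟩
            cases i with
            | zero =>
              exfalso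
              have hcl : jn.testBit b = false := by
                apply (pvBitClear_iff jn b).mpr
                simpa using h3
              have := h0 (by simpa using h1)
              rw [hcl] at this
              exact this rfl
            | succ i =>
              refine ⟨i, ?_, by omega, by
                have : jn + 1 + i = jn + (i + 1) := by omega
                rw [this]
                exact h3⟩
              rw [Nat.shiftRight_one, ← Nat.testBit_add_one]
              exact h1
    · have hx0 : xn = 0 := by omega
      subst hx0
      rw [dif_neg (by exact_mod_cast hx)]
      simp only [Bool.false_eq_true, false_iff]
      rintro ⟨i, h1, -⟩
      simp [Nat.zero_testBit] at h1

-- B's sparse difference scan decides pvDep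
theorem pvInnerB (tt : Int) (K b : Nat) (_hb : b < K) :
    pvBitScan (((2 ^ K : Nat) : Int)) (((2 ^ b : Nat) : Int))
        (PySem.Int.bxor tt (tt >>> (2 ^ b : Nat))) 0
      = pvDepB (pvAbs tt) K b := by
  rw [pvXorWord]
  set u := pvAbs tt
  have h0 : (0 : Int) = ((0 : Nat) : Int) := rfl
  rw [h0]
  have hiff : (∃ i, (u ^^^ u >>> 2 ^ b).testBit i = true ∧ 0 + i < 2 ^ K ∧ (0 + i) % 2 ^ (b + 1) < 2 ^ b)
      ↔ pvDep u K b := by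
    constructor
    · rintro ⟨i, h1, h2, h3⟩
      rw [Nat.testBit_xor, Nat.testBit_shiftRight] at h1
      refine ⟨i, by omega, by simpa using h3, ?_⟩
      rw [Nat.add_comm (2 ^ b) i] at h1
      intro he
      rw [he] at h1
      simp at h1
    · rintro ⟨i, h1, h2, h3⟩
      refine ⟨i, ?_, by omega, by simpa using h2⟩
      rw [Nat.testBit_xor, Nat.testBit_shiftRight, Nat.add_comm (2 ^ b) i]
      cases hu : u.testBit i <;> cases hv : u.testBit (i + 2 ^ b) <;> simp_all
  by_cases hd : pvDep u K b
  · rw [(pvDepB_eq _ _ _).mpr hd]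
    exact (pvBitScan_iff K b _ 0).mpr (hiff.mpr hd)
  · rw [pvDepB_false _ _ _ hd]
    cases hB : pvBitScan (((2 ^ K : Nat) : Int)) (((2 ^ b : Nat) : Int)) (((u ^^^ u >>> 2 ^ b : Nat) : Int)) (((0 : Nat) : Int))
    · rfl
    · exact absurd (hiff.mp ((pvBitScan_iff K b _ 0).mp hB)) hd

-- reflecting a countP over range K
theorem pvCountP_reflect (K : Nat) (p : Nat → Bool) :
    (List.range K).countP (fun c => p (K - 1 - c)) = (List.range K).countP p := by
  have hrev : (List.range K).map (fun i => K - 1 - i) = (List.range K).reverse := by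
    rw [List.range_eq_range', List.reverse_range']
    simp
    rw [← List.range_eq_range']
  calc (List.range K).countP (fun c => p (K - 1 - c))
      = ((List.range K).map (fun i => K - 1 - i)).countP p := by
        rw [List.countP_map]; rfl
    _ = ((List.range K).reverse).countP p := by rw [hrev]
    _ = (List.range K).countP p := List.countP_reverse

-- A's port counts pvDep over the coordinates
theorem essential_arity_eq (tt : Int) (K : Nat) (_hK : 0 < K) :
    essential_arity tt (K : Int) =
      ((List.range K).countP (fun b => pvDepB (pvAbs tt) K b) : Int) := by
  unfold essential_arity
  have hts : ((2 : Int) ^ ((K : Int)).toNat) = (2 : Int) ^ K := by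
    rw [Int.toNat_natCast]
  rw [hts, PySem.List.pyRange_zero_natCast, List.foldl_map]
  rw [PySem.List.foldl_congr_mem _ _
      (fun dep_count (c : Nat) =>
        if pvDepB (pvAbs tt) K (K - 1 - c) = true then dep_count + 1 else dep_count) _
      ?_]
  · rw [PySem.List.foldl_count_if, zero_add]
    rw [Int.natCast_inj]
    exact pvCountP_reflect K (fun b => pvDepB (pvAbs tt) K b)
  · intro acc c hc
    rw [List.mem_range] at hc
    have hb : ((K : Int) - 1 - (c : Int)).toNat = K - 1 - c := by omega
    dsimp only
    rw [pvBreakScan_eq tt (K : Int) (c : Int) ((2:Int) ^ K) ((2:Int) ^ K - 0).toNat 0 (by omega)]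
    rw [hb, pvInnerA tt K (K - 1 - c) (by omega)]

-- B's port counts pvDep over the bit positions
theorem essential_arity_alt_eq (tt : Int) (K : Nat) (_hK : 0 < K) :
    essential_arity_alt tt (K : Int) =
      ((List.range K).countP (fun b => pvDepB (pvAbs tt) K b) : Int) := by
  unfold essential_arity_alt
  rw [if_neg (by exact_mod_cast (by omega : ¬ ((K : Int) ≤ 0)))]
  simp only [Int.toNat_natCast]
  rw [PySem.List.pyRange_zero_natCast, List.foldl_map]
  rw [PySem.List.foldl_congr_mem _ _
      (fun dep_count (b : Nat) =>
        if pvDepB (pvAbs tt) K b = true then dep_count + 1 else dep_count) _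
      ?_]
  · rw [PySem.List.foldl_count_if, zero_add]
  · intro acc b hb
    rw [List.mem_range] at hb
    dsimp only
    simp only [Int.toNat_natCast, pvOneShlI, pvOneShl]
    rw [pvInnerB tt K b hb]

-- ===== VERDICT (by name: the statement is the Claim_ definition above) =====
theorem essential_arity_spec : Claim_equal_essential_arity := by
  intro tt k _
  unfold Spec_essential_arity
  by_cases hk : k ≤ 0
  · have hempty : PySem.List.pyRange 0 k = [] := by
      apply List.eq_nil_iff_forall_not_mem.mpr
      intro x hx
      have := PySem.List.mem_pyRange_one.mp hx
      omega
    unfold essential_arity essential_arity_alt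
    rw [if_pos hk]
    simp [hempty]
  · obtain ⟨K, rfl⟩ : ∃ K : Nat, k = (K : Int) :=
      ⟨k.toNat, (Int.toNat_of_nonneg (by omega)).symm⟩
    have hK : 0 < K := by exact_mod_cast (by omega : (0:Int) < (K : Int))
    rw [essential_arity_eq tt K hK, essential_arity_alt_eq tt K hK]
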